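-- pv_equiv track=rewrite | github.com/mochi-hpc-experiments/colza-experiments | ubuntu/resizing/parse-static.py | purge_events
-- ===== SOURCE A (Python) =====
-- def purge_events(events):
--     """Remove unnecessary events (and add one at the beginning)."""
--     events.insert(0, (events[0][0], 'killed', 0))
--     events_copy = []
--     n = 0
--     for i in range(0, len(events)):
--         if events[i][1] == 'killed':
--             events_copy.append(events[i])
--         elif events[i][1] == 'starting':
--             n = events[i][2]
--         elif events[i][1] == 'ready':
--             if events_copy[-1][1] == 'ready':
--                 events_copy[-1] = (events[i][0], 'ready', n)
--             else:
--                 events_copy.append((events[i][0], 'ready', n))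
--     return events_copy
-- ===== SOURCE B (Python) =====
-- def purge_events(events):
--     """Remove unnecessary events (and add one at the beginning)."""
--     events.insert(0, (events[0][0], 'killed', 0))
--     # pass 1: resolve 'starting' events into the n-tag of each 'ready', no collapsing
--     inter = []
--     n = 0
--     for t, kind, k in events:
--         if kind == 'starting':
--             n = k
--         elif kind == 'killed':
--             inter.append((t, kind, k))
--         elif kind == 'ready':
--             inter.append((t, 'ready', n))
--     # pass 2: collapse each maximal run of consecutive 'ready' entries into its last one
--     out = []
--     for e, nxt in zip(inter, inter[1:]):
--         if not (e[1] == 'ready' and nxt[1] == 'ready'):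
--             out.append(e)
--     if inter:
--         out.append(inter[-1])
--     return out
-- ===== Notes on version B (the rewrite author's own statement) =====
-- stated objective: alternative
-- what changed: Replaces A's single pass that rewrites events_copy[-1] in place with two passes: a build pass that tags every 'ready' with the current n, and a lookahead pass over adjacent pairs that keeps only the last 'ready' of each consecutive run.
import Mathlib
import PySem

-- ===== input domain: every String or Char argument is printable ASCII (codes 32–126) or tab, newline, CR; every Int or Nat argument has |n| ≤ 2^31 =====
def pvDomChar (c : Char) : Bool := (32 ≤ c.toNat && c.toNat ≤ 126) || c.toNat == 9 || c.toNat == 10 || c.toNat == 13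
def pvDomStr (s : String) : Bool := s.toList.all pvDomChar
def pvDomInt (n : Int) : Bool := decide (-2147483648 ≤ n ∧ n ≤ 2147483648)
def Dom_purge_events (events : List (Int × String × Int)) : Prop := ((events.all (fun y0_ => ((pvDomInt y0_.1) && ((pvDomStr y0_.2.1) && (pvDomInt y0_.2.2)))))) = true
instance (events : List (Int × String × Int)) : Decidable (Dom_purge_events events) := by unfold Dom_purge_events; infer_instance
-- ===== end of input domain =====

-- B replaces A's in-place rewrite of events_copy[-1] by a build pass plus a lookahead collapse pass
-- (objective: alternative decomposition). Python A and B both mutate `events` (insert at index 0);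
-- the equivalence proved here is about the return value.

-- ===== PORT A =====
-- A's loop; events_copy is kept in REVERSE order (append = cons, [-1] = head, replace [-1] = replace head).
def purgeA_loop : List (Int × String × Int) → Int → List (Int × String × Int) → List (Int × String × Int)
  | [], _, copyRev => copyRev.reverse
  | (t, k, v) :: rest, n, copyRev =>
    if k == "killed" then purgeA_loop rest n ((t, k, v) :: copyRev)
    else if k == "starting" then purgeA_loop rest v copyRev
    else if k == "ready" then
      match copyRev with
      | (t', k', v') :: tail =>
        if k' == "ready" then purgeA_loop rest n ((t, "ready", n) :: tail)
        else purgeA_loop rest n ((t, "ready", n) :: (t', k', v') :: tail)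
      | [] => []  -- Python: IndexError on events_copy[-1]; unreachable since the inserted head is 'killed'
    else purgeA_loop rest n copyRev

def purge_events (events : List (Int × String × Int)) : List (Int × String × Int) :=
  match events with
  | [] => []  -- Python: IndexError on events[0]; excluded by Pre_purge_events
  | (t0, _, _) :: _ => purgeA_loop ((t0, "killed", 0) :: events) 0 []

-- ===== PORT B =====
-- B's pass 1: tag each 'ready' with the current n, keep 'killed' as is, drop the rest.
def buildB : List (Int × String × Int) → Int → List (Int × String × Int)
  | [], _ => []
  | (t, k, v) :: rest, n =>
    if k == "starting" then buildB rest v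
    else if k == "killed" then (t, k, v) :: buildB rest n
    else if k == "ready" then (t, "ready", n) :: buildB rest n
    else buildB rest n

-- B's pass 2 (the zip-with-next loop plus final element): keep e unless e and its successor are both 'ready'.
def collapseB : List (Int × String × Int) → List (Int × String × Int)
  | [] => []
  | [e] => [e]
  | e :: e' :: rest =>
    if e.2.1 == "ready" && e'.2.1 == "ready" then collapseB (e' :: rest)
    else e :: collapseB (e' :: rest)

def purge_events_alt (events : List (Int × String × Int)) : List (Int × String × Int) :=
  match events with
  | [] => []  -- Python: IndexError on events[0]; excluded by Pre_purge_events
  | (t0, _, _) :: _ => collapseB (buildB ((t0, "killed", 0) :: events) 0)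

-- ===== PRECONDITION & SPEC =====
-- Pre_ excludes only the empty list, on which both Pythons raise IndexError at events[0].
def Pre_purge_events (events : List (Int × String × Int)) : Prop := events ≠ []
instance (events : List (Int × String × Int)) : Decidable (Pre_purge_events events) := by
  unfold Pre_purge_events; infer_instance

def pvWitness_purge_events : (List (Int × String × Int)) :=
  [(0, "starting", 2), (3, "ready", 0), (5, "ready", 0), (7, "killed", 0)]

def Spec_purge_events (events : List (Int × String × Int)) (out : List (Int × String × Int)) : Prop := out = purge_events_alt events
instance (events : List (Int × String × Int)) (out : List (Int × String × Int)) : Decidable (Spec_purge_events events out) := by unfold Spec_purge_events; infer_instance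

-- ===== CLAIM (what is proved, stated in full; the proofs are below) =====
def Claim_equal_purge_events : Prop := ∀ (events : List (Int × String × Int)), Dom_purge_events events → Pre_purge_events events → Spec_purge_events events (purge_events events)

-- ===== LEMMAS AND PROOFS =====

-- Invariant: with a nonempty copy (head c), A's loop produces the already-fixed part cs.reverse
-- followed by B's collapse of c consed onto B's build of the remaining events.
lemma purgeA_loop_eq (rest : List (Int × String × Int)) :
    ∀ (n : Int) (c : Int × String × Int) (cs : List (Int × String × Int)),
      purgeA_loop rest n (c :: cs) = cs.reverse ++ collapseB (c :: buildB rest n) := by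
  induction rest with
  | nil => intro n c cs; simp [purgeA_loop, buildB, collapseB]
  | cons e rest ih =>
    rcases e with ⟨t, k, v⟩
    intro n c cs
    by_cases hk : k = "killed"
    · subst hk
      rw [show purgeA_loop ((t, "killed", v) :: rest) n (c :: cs)
            = purgeA_loop rest n ((t, "killed", v) :: c :: cs) by simp [purgeA_loop]]
      rw [ih n (t, "killed", v) (c :: cs)]
      rcases c with ⟨tc, kc, vc⟩
      simp [buildB, collapseB]
    · by_cases hs : k = "starting"
      · subst hs
        rw [show purgeA_loop ((t, "starting", v) :: rest) n (c :: cs)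
              = purgeA_loop rest v (c :: cs) by simp [purgeA_loop]]
        rw [ih v c cs]
        simp [buildB]
      · by_cases hr : k = "ready"
        · subst hr
          rcases c with ⟨tc, kc, vc⟩
          by_cases hkc : kc = "ready"
          · subst hkc
            rw [show purgeA_loop ((t, "ready", v) :: rest) n ((tc, "ready", vc) :: cs)
                  = purgeA_loop rest n ((t, "ready", n) :: cs) by simp [purgeA_loop]]
            rw [ih n (t, "ready", n) cs]
            simp [buildB, collapseB]
          · rw [show purgeA_loop ((t, "ready", v) :: rest) n ((tc, kc, vc) :: cs)
                  = purgeA_loop rest n ((t, "ready", n) :: (tc, kc, vc) :: cs) by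
                simp [purgeA_loop, hkc]]
            rw [ih n (t, "ready", n) ((tc, kc, vc) :: cs)]
            simp [buildB, collapseB, hkc]
        · rw [show purgeA_loop ((t, k, v) :: rest) n (c :: cs)
                = purgeA_loop rest n (c :: cs) by simp [purgeA_loop, hk, hs, hr]]
          rw [ih n c cs]
          simp [buildB, hk, hs, hr]

-- ===== VERDICT (by name: the statement is the Claim_ definition above) =====
theorem purge_events_spec : Claim_equal_purge_events := by
  intro events _ hpre
  unfold Spec_purge_events
  rcases events with _ | ⟨⟨t0, k0, v0⟩, rest⟩
  · exact absurd rfl hpre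
  · show purge_events _ = purge_events_alt _
    rw [purge_events, purge_events_alt]
    rw [show purgeA_loop ((t0, "killed", 0) :: (t0, k0, v0) :: rest) 0 []
          = purgeA_loop ((t0, k0, v0) :: rest) 0 [(t0, "killed", 0)] by simp [purgeA_loop]]
    rw [purgeA_loop_eq ((t0, k0, v0) :: rest) 0 (t0, "killed", 0) []]
    simp [buildB]
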